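-- pv_equiv track=rewrite | github.com/Flaeury/DevGPT-LIWC | arquivos/second-step-Analysis.py | analisar_mensagem_liwc
-- ===== SOURCE A (Python) =====
-- def analisar_mensagem_liwc(mensagem, liwc_dict):
--     categorias_contadas = {i: 0 for i in range(1, 50)}
--     for palavra in mensagem.split():
--         palavra = palavra.lower().strip(",.?!;:'\"()[]{}")
--         if palavra in liwc_dict:
--             for categoria in liwc_dict[palavra]:
--                 categorias_contadas[categoria] += 1
--     return categorias_contadas
-- ===== SOURCE B (Python) =====
-- def analisar_mensagem_liwc(mensagem, liwc_dict):
--     # Category-major computation: normalize the words once, then for each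
--     # category 1..49 sum how many times it occurs across the matched words'
--     # category lists. No mutable counting dict at all.
--     palavras = [w.lower().strip(",.?!;:'\"()[]{}") for w in mensagem.split()]
--     return {k: sum(liwc_dict[w].count(k) for w in palavras if w in liwc_dict)
--             for k in range(1, 50)}
-- ===== Notes on version B (the rewrite author's own statement) =====
-- stated objective: alternative
-- what changed: B flips the loop structure from word-major mutation of a counts dict to a category-major pure computation: it normalizes the words once, then builds the result dict directly by summing, for each category 1..49, the occurrences of that category across the matched words' category lists.
import Mathlib
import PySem

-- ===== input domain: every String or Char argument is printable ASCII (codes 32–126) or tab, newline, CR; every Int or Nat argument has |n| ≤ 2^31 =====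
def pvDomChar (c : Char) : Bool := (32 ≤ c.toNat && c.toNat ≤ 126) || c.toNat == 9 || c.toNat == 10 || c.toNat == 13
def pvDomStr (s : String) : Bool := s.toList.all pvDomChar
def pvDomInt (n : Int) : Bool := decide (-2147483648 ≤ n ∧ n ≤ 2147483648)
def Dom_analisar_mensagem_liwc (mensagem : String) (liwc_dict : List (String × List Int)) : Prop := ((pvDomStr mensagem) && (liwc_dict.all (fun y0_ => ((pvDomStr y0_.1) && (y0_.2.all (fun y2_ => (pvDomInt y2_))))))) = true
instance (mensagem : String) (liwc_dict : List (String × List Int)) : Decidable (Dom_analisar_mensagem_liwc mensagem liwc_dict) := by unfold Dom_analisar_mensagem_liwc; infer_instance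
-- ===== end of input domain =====

-- B replaces A's word-major mutation of a counts dict by a category-major pure
-- computation: for each category 1..49, sum its occurrences over the matched words
-- (alternative decomposition, similar cost).

-- shared normalisation of one word: palavra.lower().strip(",.?!;:'\"()[]{}")
def pvNorm (w : String) : String :=
  PySem.Str.stripChars (PySem.Str.lower w) ",.?!;:'\"()[]{}"

-- ===== PORT A =====
-- 'palavra in liwc_dict' is the isSome test; 'liwc_dict[palavra]' is the lookup's value
def analisar_mensagem_liwc (mensagem : String) (liwc_dict : List (String × List Int)) : List (Int × Int) :=
  let categorias_contadas : PySem.Dict Int Int :=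
    (PySem.List.pyRange 1 50).foldl (fun d i => d.insert i 0) PySem.Dict.empty
  let final := (PySem.Str.split₀ mensagem).foldl (fun d palavra =>
    let p := pvNorm palavra
    if (List.lookup p liwc_dict).isSome then
      ((List.lookup p liwc_dict).getD []).foldl (fun d categoria => d.modify categoria 0 (· + 1)) d
    else d) categorias_contadas
  final.items

-- ===== PORT B =====
-- list comprehension, then a dict comprehension over range(1,50) whose value is a
-- filtered generator sum of liwc_dict[w].count(k)
def analisar_mensagem_liwc_alt (mensagem : String) (liwc_dict : List (String × List Int)) : List (Int × Int) :=
  let palavras := (PySem.Str.split₀ mensagem).map pvNorm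
  (PySem.List.pyRange 1 50).map (fun k =>
    (k, ((palavras.filter (fun w => (List.lookup w liwc_dict).isSome)).map
          (fun w => (((List.lookup w liwc_dict).getD []).count k : Int))).sum))

-- ===== PRECONDITION & SPEC =====
-- Pre_ excludes exactly the inputs on which A raises KeyError: a word of the message
-- whose normalised form is a key of liwc_dict with a category outside 1..49.
def Pre_analisar_mensagem_liwc (mensagem : String) (liwc_dict : List (String × List Int)) : Prop :=
  ∀ palavra ∈ PySem.Str.split₀ mensagem,
    ∀ c ∈ (List.lookup (pvNorm palavra) liwc_dict).getD [], 1 ≤ c ∧ c ≤ 49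
instance (mensagem : String) (liwc_dict : List (String × List Int)) : Decidable (Pre_analisar_mensagem_liwc mensagem liwc_dict) := by unfold Pre_analisar_mensagem_liwc; infer_instance

def pvWitness_analisar_mensagem_liwc : String × (List (String × List Int)) :=
  ("Feliz, dia feliz!", [("feliz", [1, 12]), ("dia", [3])])

def Spec_analisar_mensagem_liwc (mensagem : String) (liwc_dict : List (String × List Int)) (out : List (Int × Int)) : Prop := out = analisar_mensagem_liwc_alt mensagem liwc_dict
instance (mensagem : String) (liwc_dict : List (String × List Int)) (out : List (Int × Int)) : Decidable (Spec_analisar_mensagem_liwc mensagem liwc_dict out) := by unfold Spec_analisar_mensagem_liwc; infer_instance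

-- ===== CLAIM (what is proved, stated in full; the proofs are below) =====
def Claim_equal_analisar_mensagem_liwc : Prop := ∀ (mensagem : String) (liwc_dict : List (String × List Int)), Dom_analisar_mensagem_liwc mensagem liwc_dict → Pre_analisar_mensagem_liwc mensagem liwc_dict → Spec_analisar_mensagem_liwc mensagem liwc_dict (analisar_mensagem_liwc mensagem liwc_dict)

-- ===== LEMMAS AND PROOFS =====

-- contribution of one normalised word at category k
def pvWeight (L : List (String × List Int)) (k : Int) (w : String) : Int :=
  (((List.lookup w L).getD []).count k : Int)

lemma pv_inner_getD (n : Int) (cats : List Int) :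
    ∀ (d : PySem.Dict Int Int) (k : Int),
      (cats.foldl (fun d c => d.modify c 0 (· + n)) d).getD k 0
        = d.getD k 0 + n * (cats.count k : Int) := by
  induction cats with
  | nil => intro d k; simp
  | cons c t ih =>
      intro d k
      simp only [List.foldl_cons, ih, PySem.Dict.getD_modify]
      rcases eq_or_ne k c with h | h
      · subst h
        simp
        ring
      · simp [h, h.symm]

lemma pv_outerA_getD (L : List (String × List Int)) (nws : List String) :
    ∀ (d : PySem.Dict Int Int) (k : Int),
      (nws.foldl (fun d p =>
          if (List.lookup p L).isSome then
            ((List.lookup p L).getD []).foldl (fun d categoria => d.modify categoria 0 (· + 1)) d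
          else d) d).getD k 0
        = d.getD k 0 + (nws.map (pvWeight L k)).sum := by
  induction nws with
  | nil => intro d k; simp
  | cons w t ih =>
      intro d k
      simp only [List.foldl_cons, List.map_cons, List.sum_cons]
      cases h : List.lookup w L with
      | none => simp [pvWeight, h, ih]
      | some cats => simp [pvWeight, h, ih, pv_inner_getD]; ring

-- the filtered category-major sum equals the unfiltered weight sum (unmatched words weigh 0)
lemma pv_filter_sum (L : List (String × List Int)) (k : Int) (ws : List String) :
    ((ws.filter (fun w => (List.lookup w L).isSome)).map
        (fun w => (((List.lookup w L).getD []).count k : Int))).sum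
      = (ws.map (pvWeight L k)).sum := by
  induction ws with
  | nil => simp
  | cons w t ih =>
      cases h : List.lookup w L with
      | none => simp [h, pvWeight, ih]
      | some cats => simp [h, pvWeight, ih]

lemma pv_inner_keys (n : Int) (cats : List Int) :
    ∀ (d : PySem.Dict Int Int), (∀ c ∈ cats, c ∈ d.keys) →
      (cats.foldl (fun d c => d.modify c 0 (· + n)) d).keys = d.keys := by
  induction cats with
  | nil => intro d _; simp
  | cons c t ih =>
      intro d h
      have hc : (d.modify c 0 (· + n)).keys = d.keys := by
        rw [PySem.Dict.keys_modify, PySem.Dict.keys_insert_of_contains]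
        exact (PySem.Dict.contains_iff_mem_keys _ _).2 (h c (by simp))
      simp only [List.foldl_cons]
      rw [ih _ (by rw [hc]; exact fun x hx => h x (by simp [hx])), hc]

lemma pv_outerA_keys (L : List (String × List Int)) (nws : List String) :
    ∀ (d : PySem.Dict Int Int), d.keys = PySem.List.pyRange 1 50 →
      (∀ w ∈ nws, ∀ c ∈ (List.lookup w L).getD [], 1 ≤ c ∧ c ≤ 49) →
      (nws.foldl (fun d p =>
          if (List.lookup p L).isSome then
            ((List.lookup p L).getD []).foldl (fun d categoria => d.modify categoria 0 (· + 1)) d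
          else d) d).keys = PySem.List.pyRange 1 50 := by
  induction nws with
  | nil => intro d hk _; simpa using hk
  | cons w t ih =>
      intro d hk hpre
      simp only [List.foldl_cons]
      cases h : List.lookup w L with
      | none =>
          simp only [Option.isSome_none, Bool.false_eq_true, if_false]
          exact ih d hk (fun x hx => hpre x (by simp [hx]))
      | some cats =>
          simp only [Option.isSome_some, if_true, Option.getD_some]
          have hkeep : (cats.foldl (fun d c => d.modify c 0 (· + 1)) d).keys = d.keys := by
            refine pv_inner_keys 1 cats d (fun c hc => ?_)
            have := hpre w (by simp) c (by simp [h, hc])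
            rw [hk, PySem.List.mem_pyRange_one]
            omega
          exact ih _ (by rw [hkeep, hk]) (fun x hx => hpre x (by simp [hx]))

set_option maxRecDepth 20000 in
lemma pv_init_keys :
    ((PySem.List.pyRange 1 50).foldl (fun d i => d.insert i 0) (PySem.Dict.empty : PySem.Dict Int Int)).keys
      = PySem.List.pyRange 1 50 := by decide

set_option maxRecDepth 20000 in
lemma pv_init_nodup : (PySem.List.pyRange (1:Int) 50).Nodup := by decide

lemma pv_init_getD (l : List Int) :
    ∀ (d : PySem.Dict Int Int) (k : Int), d.getD k 0 = 0 →
      ((l.foldl (fun d i => d.insert i 0) d).getD k 0) = 0 := by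
  induction l with
  | nil => intro d k h; simpa using h
  | cons i t ih =>
      intro d k h
      simp only [List.foldl_cons]
      refine ih _ k ?_
      rw [PySem.Dict.getD_insert]
      split_ifs <;> simp [h]

lemma pv_foldA_eq (L : List (String × List Int)) (ws : List String) (d0 : PySem.Dict Int Int) :
    ws.foldl (fun d palavra =>
        if (List.lookup (pvNorm palavra) L).isSome then
          ((List.lookup (pvNorm palavra) L).getD []).foldl (fun d categoria => d.modify categoria 0 (· + 1)) d
        else d) d0
      = (ws.map pvNorm).foldl (fun d p =>
        if (List.lookup p L).isSome then
          ((List.lookup p L).getD []).foldl (fun d categoria => d.modify categoria 0 (· + 1)) d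
        else d) d0 := by rw [List.foldl_map]

-- ===== VERDICT (by name: the statement is the Claim_ definition above) =====
set_option maxHeartbeats 2000000 in
theorem analisar_mensagem_liwc_spec : Claim_equal_analisar_mensagem_liwc := by
  intro mensagem liwc_dict _hdom hpre
  unfold Spec_analisar_mensagem_liwc
  simp only [analisar_mensagem_liwc, analisar_mensagem_liwc_alt]
  rw [pv_foldA_eq]
  have hpre' : ∀ w ∈ (PySem.Str.split₀ mensagem).map pvNorm,
      ∀ c ∈ (List.lookup w liwc_dict).getD [], 1 ≤ c ∧ c ≤ 49 := by
    intro w hw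
    rcases List.mem_map.1 hw with ⟨p, hp, rfl⟩
    exact hpre p hp
  have hA_keys := pv_outerA_keys liwc_dict ((PySem.Str.split₀ mensagem).map pvNorm) _ pv_init_keys hpre'
  rw [PySem.Dict.items_eq_map_keys _ (by rw [hA_keys]; exact pv_init_nodup) 0, hA_keys]
  refine List.map_congr_left (fun k _ => ?_)
  have hz : ((PySem.List.pyRange 1 50).foldl (fun d i => d.insert i 0)
      (PySem.Dict.empty : PySem.Dict Int Int)).getD k 0 = 0 :=
    pv_init_getD _ _ _ (by simp)
  rw [Prod.mk.injEq]
  exact ⟨rfl, by rw [pv_outerA_getD, hz, zero_add, pv_filter_sum]⟩
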